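-- pv_equiv track=rewrite | github.com/qantik/The-Area-Latency-Symbiosis | gift/test_vectors/key_test.py | sched_norm
-- ===== SOURCE A (Python) =====
-- def sched_norm(k, r):
--     for i in range(r):
--         # rotate k0 >> 12
--         k0 = k[112:128]
--         k0 = k0[4:16] + k0[0:4]
--
--         # rotate k1 >> 2
--         k1 = k[96:112]
--         k1 = k1[14:16] + k1[0:14]
--
--         # rotate k >> 32
--         k = k1 + k0 + k[0:96]
--     return k
-- ===== SOURCE B (Python) =====
-- # Binary powering of the round's index map: O(n log r) instead of O(n r).
-- def sched_norm(k, r):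
--     idx = list(range(len(k)))
--     w1 = idx[96:112]
--     w0 = idx[112:128]
--     base = w1[14:] + w1[:14] + w0[4:] + w0[:4] + idx[:96]  # source index of each bit after one round
--     q = idx  # zero rounds: the identity map
--     m = r
--     while m > 0:
--         if m & 1:
--             q = [q[x] for x in base]
--         base = [base[x] for x in base]
--         m >>= 1
--     return [k[x] for x in q]
-- ===== Notes on version B (the rewrite author's own statement) =====
-- stated objective: faster
-- what changed: B builds the round's index map once from list(range(len(k))) and raises it to the r-th power by binary squaring of index maps, then gathers the key through it, instead of slicing and re-concatenating the key r times.
import Mathlib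
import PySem

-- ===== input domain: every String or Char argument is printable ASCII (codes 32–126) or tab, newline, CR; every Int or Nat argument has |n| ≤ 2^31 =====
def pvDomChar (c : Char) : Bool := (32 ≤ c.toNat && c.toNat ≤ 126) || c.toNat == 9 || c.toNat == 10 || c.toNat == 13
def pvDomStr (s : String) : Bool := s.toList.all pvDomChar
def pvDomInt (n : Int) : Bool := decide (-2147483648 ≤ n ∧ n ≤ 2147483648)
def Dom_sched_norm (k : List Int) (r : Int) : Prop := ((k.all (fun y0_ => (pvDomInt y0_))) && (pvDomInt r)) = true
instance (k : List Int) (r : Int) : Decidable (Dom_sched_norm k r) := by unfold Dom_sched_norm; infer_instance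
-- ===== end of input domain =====

-- B builds the round's index map once and raises it to the r-th power by binary
-- squaring of index maps, then gathers the key through it (asymptotically fewer
-- list passes than A's r-fold slicing); proved equal to A on every input.

-- ===== PORT A =====
def sched_norm (k : List Int) (r : Int) : List Int :=
  (PySem.List.pyRange 0 r 1).foldl
    (fun k _i =>
      -- rotate k0 >> 12
      let k0 := PySem.List.slice k (some 112) (some 128)
      let k0 := PySem.List.slice k0 (some 4) (some 16) ++ PySem.List.slice k0 (some 0) (some 4)
      -- rotate k1 >> 2
      let k1 := PySem.List.slice k (some 96) (some 112)
      let k1 := PySem.List.slice k1 (some 14) (some 16) ++ PySem.List.slice k1 (some 0) (some 14)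
      -- rotate k >> 32
      k1 ++ k0 ++ PySem.List.slice k (some 0) (some 96))
    k

-- ===== PORT B =====
-- [q[x] for x in m]  (the gather comprehension Source B uses three times)
def idxMap (m l : List Int) : List Int := m.map (fun x => (PySem.List.pyGet? l x).getD 0)

-- the while-loop of Source B; for m > 0, Python's `m & 1` is `m % 2 == 1` and `m >>= 1` is `m //= 2`
def powLoop (q base : List Int) (m : Int) : List Int :=
  if _h : 0 < m then
    powLoop (if PySem.Int.mod m 2 = 1 then idxMap base q else q)
            (idxMap base base) (PySem.Int.floordiv m 2)
  else q
termination_by m.toNat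
decreasing_by
  rw [PySem.Int.floordiv_eq_ediv_of_pos (by omega : (0:Int) < 2)]
  omega

def sched_norm_alt (k : List Int) (r : Int) : List Int :=
  let idx := PySem.List.pyRange 0 (k.length : Int) 1
  let w1 := PySem.List.slice idx (some 96) (some 112)
  let w0 := PySem.List.slice idx (some 112) (some 128)
  let base := PySem.List.slice w1 (some 14) none ++ PySem.List.slice w1 none (some 14)
    ++ PySem.List.slice w0 (some 4) none ++ PySem.List.slice w0 none (some 4)
    ++ PySem.List.slice idx none (some 96)
  let q := powLoop idx base r
  idxMap q k

-- ===== PRECONDITION & SPEC =====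
def Spec_sched_norm (k : List Int) (r : Int) (out : List Int) : Prop := out = sched_norm_alt k r
instance (k : List Int) (r : Int) (out : List Int) : Decidable (Spec_sched_norm k r out) := by unfold Spec_sched_norm; infer_instance

-- ===== CLAIM (what is proved, stated in full; the proofs are below) =====
def Claim_equal_sched_norm : Prop := ∀ (k : List Int) (r : Int), Dom_sched_norm k r → Spec_sched_norm k r (sched_norm k r)

-- ===== LEMMAS AND PROOFS =====

-- A's loop body as a named step
def schedStep (k : List Int) : List Int :=
  let k0 := PySem.List.slice k (some 112) (some 128)
  let k0 := PySem.List.slice k0 (some 4) (some 16) ++ PySem.List.slice k0 (some 0) (some 4)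
  let k1 := PySem.List.slice k (some 96) (some 112)
  let k1 := PySem.List.slice k1 (some 14) (some 16) ++ PySem.List.slice k1 (some 0) (some 14)
  k1 ++ k0 ++ PySem.List.slice k (some 0) (some 96)

-- the identity index list [0, 1, …, n-1]
def idOf (n : ℕ) : List Int := (List.range n).map (fun (i : ℕ) => (i : Int))

-- normal form of one round as drops/takes
def stepNF (x : List Int) : List Int :=
  (x.drop 110).take 2 ++ (x.drop 96).take 14 ++
    ((x.drop 116).take 12 ++ (x.drop 112).take 4 ++ x.take 96)

theorem schedStep_eq (x : List Int) : schedStep x = stepNF x := by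
  simp [schedStep, stepNF, pysem]
  simp [List.drop_take, List.take_take, List.drop_drop]

theorem foldl_const_iterate {α β : Type} (l : List β) (f : α → α) (x : α) :
    l.foldl (fun a _ => f a) x = f^[l.length] x := by
  induction l generalizing x with
  | nil => rfl
  | cons b t ih => simp [List.foldl_cons, ih, Function.iterate_succ_apply]

theorem A_iterate (k : List Int) (r : Int) : sched_norm k r = schedStep^[r.toNat] k := by
  have h1 : sched_norm k r = (PySem.List.pyRange 0 r 1).foldl (fun a _ => schedStep a) k := rfl
  rw [h1, foldl_const_iterate, PySem.List.length_pyRange_one]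
  norm_num

theorem stepNF_map (f : Int → Int) (l : List Int) : stepNF (l.map f) = (stepNF l).map f := by
  simp [stepNF, List.map_take, List.map_drop, List.map_append]

theorem schedStep_idxMap (m l : List Int) : schedStep (idxMap m l) = idxMap (schedStep m) l := by
  rw [schedStep_eq, schedStep_eq, idxMap, idxMap, stepNF_map]

theorem id_gather (l : List Int) : idxMap (idOf l.length) l = l := by
  apply List.ext_getElem
  · simp [idxMap, idOf]
  · intro i h1 h2
    simp [idxMap, idOf, PySem.List.pyGet?_natCast, List.getElem?_eq_getElem h2]

theorem round_gather (x : List Int) : schedStep x = idxMap (schedStep (idOf x.length)) x := by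
  conv_lhs => rw [← id_gather x]
  rw [schedStep_idxMap]

-- every value of the map is a valid index into the map itself
def SelfMap (b : List Int) : Prop := ∀ x ∈ b, 0 ≤ x ∧ x.toNat < b.length

theorem idxMap_comp (a b l : List Int) (h : ∀ x ∈ a, 0 ≤ x ∧ x.toNat < b.length) :
    idxMap a (idxMap b l) = idxMap (idxMap a b) l := by
  unfold idxMap
  rw [List.map_map]
  apply List.map_congr_left
  intro x hx
  obtain ⟨h0, hlt⟩ := h x hx
  simp only [Function.comp]
  rw [PySem.List.pyGet?_of_nonneg _ h0, PySem.List.pyGet?_of_nonneg _ h0]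
  simp [List.getElem?_eq_getElem hlt, List.getElem?_eq_getElem (by simpa using hlt : x.toNat < (List.map (fun x => (PySem.List.pyGet? l x).getD 0) b).length)]

theorem len_stepNF (x : List Int) : (stepNF x).length = min x.length 128 := by
  simp [stepNF]
  omega

theorem mem_stepNF {v : Int} {x : List Int} (h : v ∈ stepNF x) : v ∈ x := by
  simp only [stepNF, List.mem_append] at h
  rcases h with (h | h) | (h | h) | h <;>
    first
      | exact List.mem_of_mem_drop (List.mem_of_mem_take h)
      | exact List.mem_of_mem_take h

theorem seg (n a c : ℕ) (h : a + c ≤ n) :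
    ((List.range n).drop a).take c = List.range' a c := by
  apply List.ext_getElem
  · simp; omega
  · intro i h1 h2
    simp [List.getElem_take, List.getElem_drop, List.getElem_range, List.getElem_range']

theorem stepNF_idOf_seg (n : ℕ) (h : 128 ≤ n) :
    stepNF (idOf n) =
      ((List.range' 110 2).map (fun (i : ℕ) => (i : Int))) ++ ((List.range' 96 14).map (fun (i : ℕ) => (i : Int))) ++
        (((List.range' 116 12).map (fun (i : ℕ) => (i : Int))) ++ ((List.range' 112 4).map (fun (i : ℕ) => (i : Int))) ++
          ((List.range' 0 96).map (fun (i : ℕ) => (i : Int)))) := by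
  unfold stepNF idOf
  rw [← List.map_drop, ← List.map_take, ← List.map_drop, ← List.map_take,
      ← List.map_drop, ← List.map_take, ← List.map_drop, ← List.map_take, ← List.map_take]
  rw [show (List.range n).take 96 = ((List.range n).drop 0).take 96 by simp]
  rw [seg n 110 2 (by omega), seg n 96 14 (by omega), seg n 116 12 (by omega),
      seg n 112 4 (by omega), seg n 0 96 (by omega)]

theorem stab (n : ℕ) (h : 128 ≤ n) : stepNF (idOf n) = stepNF (idOf 128) := by
  rw [stepNF_idOf_seg n h, stepNF_idOf_seg 128 (by omega)]

theorem selfmap_base (n : ℕ) : SelfMap (stepNF (idOf n)) := by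
  intro v hv
  rw [len_stepNF]
  have hn : (idOf n).length = n := by simp [idOf]
  rw [hn]
  by_cases h : 128 ≤ n
  · rw [stab n h] at hv
    rw [stepNF_idOf_seg 128 (by omega)] at hv
    simp only [List.mem_append, List.mem_map, List.mem_range'] at hv
    rcases hv with (⟨i, hi, hveq⟩ | ⟨i, hi, hveq⟩) | (⟨i, hi, hveq⟩ | ⟨i, hi, hveq⟩) | ⟨i, hi, hveq⟩ <;>
      omega
  · have := mem_stepNF hv
    simp only [idOf, List.mem_map, List.mem_range] at this
    obtain ⟨i, hi, hveq⟩ := this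
    omega

theorem selfmap_sq {b : List Int} (hb : SelfMap b) : SelfMap (idxMap b b) := by
  intro x hx
  have hlen : (idxMap b b).length = b.length := by simp [idxMap]
  rw [hlen]
  simp only [idxMap, List.mem_map] at hx
  obtain ⟨y, hy, rfl⟩ := hx
  obtain ⟨h0, hlt⟩ := hb y hy
  rw [PySem.List.pyGet?_of_nonneg _ h0]
  simp [List.getElem?_eq_getElem hlt]
  exact hb _ (List.getElem_mem hlt)

theorem iter_double {b : List Int} (hb : SelfMap b) :
    ∀ (t : ℕ) (x : List Int), (fun y => idxMap (idxMap b b) y)^[t] x = (fun y => idxMap b y)^[2 * t] x := by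
  intro t
  induction t with
  | zero => intro x; rfl
  | succ s ih =>
    intro x
    rw [Function.iterate_succ_apply, ih]
    have : idxMap (idxMap b b) x = idxMap b (idxMap b x) := (idxMap_comp b b x hb).symm
    rw [this, show 2 * (s + 1) = 2 * s + 1 + 1 by omega,
        Function.iterate_succ_apply, Function.iterate_succ_apply]

theorem powLoop_eq_aux : ∀ (K : ℕ) (q b : List Int) (m : Int), m.toNat = K → SelfMap b →
    powLoop q b m = (fun y => idxMap b y)^[K] q := by
  intro K
  induction K using Nat.strong_induction_on with
  | _ K ih =>
    intro q b m hK hb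
    by_cases h : 0 < m
    · rw [powLoop, dif_pos h]
      have hdiv : PySem.Int.floordiv m 2 = m / 2 := PySem.Int.floordiv_eq_ediv_of_pos (by omega)
      have hmod : PySem.Int.mod m 2 = m % 2 := PySem.Int.mod_eq_emod_of_pos (by omega)
      have hKdiv : (PySem.Int.floordiv m 2).toNat = K / 2 := by rw [hdiv]; omega
      rw [ih (K / 2) (by omega) _ _ _ hKdiv (selfmap_sq hb), iter_double hb]
      by_cases hodd : PySem.Int.mod m 2 = 1
      · rw [if_pos hodd, ← Function.iterate_succ_apply]
        congr 1
        rw [hmod] at hodd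
        omega
      · rw [if_neg hodd]
        congr 1
        rw [hmod] at hodd
        omega
    · rw [powLoop, dif_neg h]
      have h0 : K = 0 := by omega
      rw [h0]
      rfl

theorem powLoop_eq (q b : List Int) (m : Int) (hb : SelfMap b) :
    powLoop q b m = (fun y => idxMap b y)^[m.toNat] q :=
  powLoop_eq_aux m.toNat q b m rfl hb

theorem len_iter (n : ℕ) (m : ℕ) :
    (schedStep^[m] (idOf n)).length = if m = 0 then n else min n 128 := by
  induction m with
  | zero => simp [idOf]
  | succ t ih =>
    rw [Function.iterate_succ_apply', schedStep_eq, len_stepNF, ih]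
    by_cases ht : t = 0 <;> simp [ht]

theorem bridge (n : ℕ) (m : ℕ) :
    (fun y => idxMap (schedStep (idOf n)) y)^[m] (idOf n) = schedStep^[m] (idOf n) := by
  induction m with
  | zero => rfl
  | succ t ih =>
    rw [Function.iterate_succ_apply', Function.iterate_succ_apply', ih]
    show idxMap (schedStep (idOf n)) (schedStep^[t] (idOf n)) = schedStep (schedStep^[t] (idOf n))
    rw [round_gather (schedStep^[t] (idOf n))]
    congr 1
    rw [len_iter n t]
    by_cases ht : t = 0
    · simp [ht]
    · rw [if_neg ht]
      by_cases h128 : 128 ≤ n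
      · have hmin : min n 128 = 128 := by omega
        rw [hmin, schedStep_eq, schedStep_eq, stab n h128]
      · have hmin : min n 128 = n := by omega
        rw [hmin]

theorem iterA_gather (k : List Int) (m : ℕ) :
    schedStep^[m] k = idxMap (schedStep^[m] (idOf k.length)) k := by
  induction m with
  | zero => exact (id_gather k).symm
  | succ t ih =>
    rw [Function.iterate_succ_apply', Function.iterate_succ_apply', ih, schedStep_idxMap]

theorem altB (k : List Int) (r : Int) :
    sched_norm_alt k r = idxMap (powLoop (idOf k.length) (stepNF (idOf k.length)) r) k := by
  have hidx : PySem.List.pyRange 0 (k.length : Int) 1 = idOf k.length := by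
    rw [PySem.List.pyRange_one]
    simp [idOf]
  have hbase : ∀ x : List Int,
      PySem.List.slice (PySem.List.slice x (some 96) (some 112)) (some 14) none
        ++ PySem.List.slice (PySem.List.slice x (some 96) (some 112)) none (some 14)
        ++ PySem.List.slice (PySem.List.slice x (some 112) (some 128)) (some 4) none
        ++ PySem.List.slice (PySem.List.slice x (some 112) (some 128)) none (some 4)
        ++ PySem.List.slice x none (some 96) = stepNF x := by
    intro x
    simp [stepNF, pysem]
    simp [List.drop_take, List.take_take, List.drop_drop]
  show idxMap (powLoop (PySem.List.pyRange 0 (k.length : Int) 1) _ r) k = _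
  rw [hidx, hbase]

-- ===== VERDICT (by name: the statement is the Claim_ definition above) =====
theorem sched_norm_spec : Claim_equal_sched_norm := by
  intro k r _
  show sched_norm k r = sched_norm_alt k r
  rw [altB, A_iterate, powLoop_eq _ _ _ (selfmap_base k.length), iterA_gather]
  congr 1
  rw [show stepNF (idOf k.length) = schedStep (idOf k.length) from (schedStep_eq _).symm]
  exact (bridge k.length r.toNat).symm
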